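-- pv_equiv track=rewrite | github.com/pbuck26/2048-Game | gameCalculator.py | mergeCheck
-- ===== SOURCE A (Python) =====
-- def mergeCheck(indexNeeded, boardArray, score):
--     if indexNeeded == -1:
--             boardArray.reverse()
--     i = 1
--     while i  < len(boardArray):
--         if boardArray[i] == boardArray[i- 1]:
--             boardArray[i-1] *= 2
--             # scoring algorthim is to add
--             # the resulting number of each merge to
--             # total score
--             score += boardArray[i-1]
--             #remove duplicate
--             del boardArray[i]
--         i += 1
--     if indexNeeded == -1:
--         boardArray.reverse()
--     return boardArray,score
-- ===== SOURCE B (Python) =====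
-- def mergeCheck(indexNeeded, boardArray, score):
--     row = boardArray[::-1] if indexNeeded == -1 else boardArray[:]
--     result = []
--     n = len(row)
--     j = 0
--     while j < n:
--         if j + 1 < n and row[j] == row[j + 1]:
--             v = row[j] * 2
--             result.append(v)
--             score += v
--             j += 2
--         else:
--             result.append(row[j])
--             j += 1
--     if indexNeeded == -1:
--         result.reverse()
--     boardArray[:] = result
--     return boardArray, score
-- ===== Notes on version B (the rewrite author's own statement) =====
-- stated objective: simpler
-- what changed: Instead of A's in-place delete-while-iterating loop over a shrinking list (each del shifts the tail), B scans a fixed row once with an index that advances by 2 on a merge, building a fresh result list which is then written back into boardArray.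
import Mathlib
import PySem

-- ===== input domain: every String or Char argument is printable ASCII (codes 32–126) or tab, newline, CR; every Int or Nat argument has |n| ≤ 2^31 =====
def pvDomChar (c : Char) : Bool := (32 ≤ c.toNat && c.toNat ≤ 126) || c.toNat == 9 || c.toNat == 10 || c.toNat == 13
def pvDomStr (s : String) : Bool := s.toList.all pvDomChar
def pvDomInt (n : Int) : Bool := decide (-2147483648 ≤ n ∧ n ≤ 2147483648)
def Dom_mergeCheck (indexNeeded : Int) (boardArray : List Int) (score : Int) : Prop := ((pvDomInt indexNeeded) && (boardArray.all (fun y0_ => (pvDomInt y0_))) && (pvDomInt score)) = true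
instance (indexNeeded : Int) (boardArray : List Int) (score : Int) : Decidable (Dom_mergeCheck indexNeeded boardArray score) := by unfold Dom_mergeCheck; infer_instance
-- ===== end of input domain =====

-- B replaces A's delete-while-iterating in-place loop by a single forward scan that
-- builds a fresh merged list (objective: simpler). Both Pythons mutate boardArray to
-- the same final contents; the equivalence proved here is about the return value.

-- ===== PORT A =====
-- the while loop: i scans the (shrinking) list; on a merge the element at i is deleted
def mergeLoopA (b : List Int) (score : Int) (i : Nat) : List Int × Int :=
  if h : i < b.length then
    if b.getD i 0 = b.getD (i - 1) 0 then
      let v := b.getD (i - 1) 0 * 2            -- boardArray[i-1] *= 2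
      mergeLoopA ((b.set (i - 1) v).eraseIdx i) (score + v) (i + 1)  -- score += …; del boardArray[i]
    else
      mergeLoopA b score (i + 1)
  else (b, score)
termination_by b.length - i
decreasing_by
  · simp only [List.length_eraseIdx, List.length_set, h, if_true]; omega
  · omega

def mergeCheck (indexNeeded : Int) (boardArray : List Int) (score : Int) : List Int × Int :=
  let b := if indexNeeded == -1 then boardArray.reverse else boardArray
  let r := mergeLoopA b score 1
  (if indexNeeded == -1 then r.1.reverse else r.1, r.2)

-- ===== PORT B =====
-- single scan over the fixed row, appending to result; a merge advances j by 2
def mergeLoopB (row : List Int) (result : List Int) (score : Int) (j : Nat) : List Int × Int :=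
  if h : j < row.length then
    if j + 1 < row.length ∧ row.getD j 0 = row.getD (j + 1) 0 then
      let v := row.getD j 0 * 2
      mergeLoopB row (result ++ [v]) (score + v) (j + 2)
    else
      mergeLoopB row (result ++ [row.getD j 0]) score (j + 1)
  else (result, score)
termination_by row.length - j

def mergeCheck_alt (indexNeeded : Int) (boardArray : List Int) (score : Int) : List Int × Int :=
  let row := if indexNeeded == -1 then boardArray.reverse else boardArray
  let r := mergeLoopB row [] score 0
  (if indexNeeded == -1 then r.1.reverse else r.1, r.2)

-- ===== PRECONDITION & SPEC =====
def Spec_mergeCheck (indexNeeded : Int) (boardArray : List Int) (score : Int) (out : List Int × Int) : Prop := out = mergeCheck_alt indexNeeded boardArray score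
instance (indexNeeded : Int) (boardArray : List Int) (score : Int) (out : List Int × Int) : Decidable (Spec_mergeCheck indexNeeded boardArray score out) := by unfold Spec_mergeCheck; infer_instance

-- ===== CLAIM (what is proved, stated in full; the proofs are below) =====
def Claim_equal_mergeCheck : Prop := ∀ (indexNeeded : Int) (boardArray : List Int) (score : Int), Dom_mergeCheck indexNeeded boardArray score → Spec_mergeCheck indexNeeded boardArray score (mergeCheck indexNeeded boardArray score)

-- ===== LEMMAS AND PROOFS =====

-- reference form of the merge pass: structural recursion on the row
def mergeRec : List Int → List Int × Int
  | [] => ([], 0)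
  | [x] => ([x], 0)
  | x :: y :: rest =>
    if x = y then (x * 2 :: (mergeRec rest).1, x * 2 + (mergeRec rest).2)
    else (x :: (mergeRec (y :: rest)).1, (mergeRec (y :: rest)).2)

theorem mergeRec_short (l : List Int) (h : l.length ≤ 1) : mergeRec l = (l, 0) := by
  match l with
  | [] => rfl
  | [x] => rfl
  | x :: y :: rest => simp at h

theorem mergeLoopB_eq (row result : List Int) (score : Int) (j : Nat) :
    mergeLoopB row result score j =
      (result ++ (mergeRec (row.drop j)).1, score + (mergeRec (row.drop j)).2) := by
  fun_induction mergeLoopB row result score j with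
  | case1 result score j h hc v ih =>
    obtain ⟨h1, he⟩ := hc
    rw [ih]
    have hd : row.drop j = row[j] :: row[j+1] :: row.drop (j+2) := by
      rw [List.drop_eq_getElem_cons h, List.drop_eq_getElem_cons h1]
    rw [List.getD_eq_getElem _ _ h, List.getD_eq_getElem _ _ h1] at he
    simp only [v, hd, mergeRec, he, if_true, List.getD_eq_getElem _ _ h, Prod.mk.injEq]
    constructor
    · simp
    · ring
  | case2 result score j h hc ih =>
    rw [ih]
    by_cases h1 : j + 1 < row.length
    · have he : ¬ row.getD j 0 = row.getD (j+1) 0 := fun he => hc ⟨h1, he⟩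
      rw [List.getD_eq_getElem _ _ h, List.getD_eq_getElem _ _ h1] at he
      have hd : row.drop j = row[j] :: row[j+1] :: row.drop (j+2) := by
        rw [List.drop_eq_getElem_cons h, List.drop_eq_getElem_cons h1]
      have hd1 : row.drop (j+1) = row[j+1] :: row.drop (j+2) := List.drop_eq_getElem_cons h1
      simp only [hd, hd1, mergeRec, if_neg he, List.getD_eq_getElem _ _ h]
      simp
    · have hlen : row.length = j + 1 := by omega
      have hd1 : row.drop (j+1) = [] := List.drop_eq_nil_of_le (by omega)
      have hd : row.drop j = [row[j]] := by
        rw [List.drop_eq_getElem_cons h, hd1]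
      simp [hd, hd1, mergeRec, List.getElem?_eq_getElem h]
  | case3 result score j h =>
    have hd : row.drop j = [] := by simp; omega
    simp [hd, mergeRec]

theorem mergeLoopA_eq (b : List Int) (score : Int) (i : Nat) :
    1 ≤ i →
    mergeLoopA b score i =
      (b.take (i-1) ++ (mergeRec (b.drop (i-1))).1, score + (mergeRec (b.drop (i-1))).2) := by
  fun_induction mergeLoopA b score i with
  | case1 b score i h he v ih =>
    intro hi
    obtain ⟨k, rfl⟩ : ∃ k, i = k + 1 := ⟨i - 1, by omega⟩
    have h1 : k < b.length := by omega
    rw [List.getD_eq_getElem _ _ h, List.getD_eq_getElem _ _ (by omega : k + 1 - 1 < b.length)] at he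
    simp only [Nat.add_sub_cancel] at he ih ⊢
    rw [ih (by omega)]
    have hv : v = b[k] * 2 := by
      simp only [v, Nat.add_sub_cancel, List.getD_eq_getElem _ _ h1]
    -- the mutated list is take k ++ v :: drop (k+2)
    have hb' : (b.set k v).eraseIdx (k + 1) = b.take k ++ [v] ++ b.drop (k+2) := by
      rw [List.set_eq_take_append_cons_drop, if_pos h1]
      have hpre : b.take k ++ v :: b.drop (k+1) = (b.take k ++ [v]) ++ b.drop (k+1) := by simp
      rw [hpre]
      have hlpre : (b.take k ++ [v]).length = k + 1 := by simp [List.length_take]; omega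
      have htail : (b.drop (k+1)).eraseIdx ((k+1) - (b.take k ++ [v]).length) = b.drop (k+2) := by
        rw [hlpre, Nat.sub_self, List.drop_eq_getElem_cons h]
        rfl
      rw [List.eraseIdx_append_of_length_le (by simp [hlpre]), htail]
    have hdold : b.drop k = b[k] :: b[k+1] :: b.drop (k+2) := by
      rw [List.drop_eq_getElem_cons h1, List.drop_eq_getElem_cons h]
    have hlpre2 : (b.take k ++ [v]).length = k + 1 := by simp [List.length_take]; omega
    have htk : ((b.set k v).eraseIdx (k + 1)).take (k + 1) = b.take k ++ [v] := by
      rw [hb', ← hlpre2, List.take_left]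
    have hdk : ((b.set k v).eraseIdx (k + 1)).drop (k + 1) = b.drop (k+2) := by
      rw [hb', ← hlpre2, List.drop_left]
    rw [htk, hdk, hdold, he]
    simp only [mergeRec, if_true, Prod.mk.injEq]
    refine ⟨by simp [hv], by rw [hv]; ring⟩
  | case2 b score i h he ih =>
    intro hi
    obtain ⟨k, rfl⟩ : ∃ k, i = k + 1 := ⟨i - 1, by omega⟩
    have h1 : k < b.length := by omega
    rw [List.getD_eq_getElem _ _ h, List.getD_eq_getElem _ _ (by omega : k + 1 - 1 < b.length)] at he
    simp only [Nat.add_sub_cancel] at he ih ⊢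
    rw [ih (by omega)]
    have hne : ¬ b[k] = b[k+1] := fun hh => he hh.symm
    have hdold : b.drop k = b[k] :: b[k+1] :: b.drop (k+2) := by
      rw [List.drop_eq_getElem_cons h1, List.drop_eq_getElem_cons h]
    have hd1 : b.drop (k+1) = b[k+1] :: b.drop (k+2) := List.drop_eq_getElem_cons h
    have htk : b.take (k+1) = b.take k ++ [b[k]] := by
      rw [List.take_succ, List.getElem?_eq_getElem h1]
      rfl
    rw [htk, hdold, hd1]
    simp only [mergeRec, if_neg hne, Prod.mk.injEq]
    exact ⟨by simp only [List.append_assoc, List.singleton_append], trivial⟩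
  | case3 b score i h =>
    intro hi
    have hshort : (b.drop (i-1)).length ≤ 1 := by simp; omega
    rw [mergeRec_short _ hshort]
    simp

-- ===== VERDICT (by name: the statement is the Claim_ definition above) =====
theorem mergeCheck_spec : Claim_equal_mergeCheck := by
  intro indexNeeded boardArray score _
  unfold Spec_mergeCheck mergeCheck mergeCheck_alt
  dsimp only
  rw [mergeLoopA_eq _ _ _ (by omega), mergeLoopB_eq]
  simp
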